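-- pv_equiv track=rewrite | github.com/yaochong-cc/LeetCode- | 2391.收集垃圾的最少时间.py | garbageCollection
-- ===== SOURCE A (Python) =====
-- from typing import List
--
-- def garbageCollection(garbage: List[str], travel: List[int]) -> int:
--     ans = sum(map(len, garbage)) + sum(travel) * 3
--     for c in "MPG":
--         for g, t in zip(reversed(garbage), reversed(travel)):
--             if c in g:
--                 break
--             ans -= t  # 没有垃圾 c，多跑了
--     return ans
-- ===== SOURCE B (Python) =====
-- def garbageCollection(garbage, travel):
--     n, m = len(garbage), len(travel)
--     total = sum(len(g) for g in garbage)
--     for c in "MPG":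
--         last = -1
--         for i, g in enumerate(garbage):
--             if c in g:
--                 last = i
--         j = n - 1 - last if last >= 0 else n
--         total += sum(travel[:max(m - j, 0)])
--     return total
-- ===== Notes on version B (the rewrite author's own statement) =====
-- stated objective: alternative
-- what changed: B records the last house index containing each garbage type in a forward scan and adds the travel prefix needed to reach it, instead of A's start-from-3*sum(travel) with a backward scan subtracting unneeded trailing segments per type.
import Mathlib
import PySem

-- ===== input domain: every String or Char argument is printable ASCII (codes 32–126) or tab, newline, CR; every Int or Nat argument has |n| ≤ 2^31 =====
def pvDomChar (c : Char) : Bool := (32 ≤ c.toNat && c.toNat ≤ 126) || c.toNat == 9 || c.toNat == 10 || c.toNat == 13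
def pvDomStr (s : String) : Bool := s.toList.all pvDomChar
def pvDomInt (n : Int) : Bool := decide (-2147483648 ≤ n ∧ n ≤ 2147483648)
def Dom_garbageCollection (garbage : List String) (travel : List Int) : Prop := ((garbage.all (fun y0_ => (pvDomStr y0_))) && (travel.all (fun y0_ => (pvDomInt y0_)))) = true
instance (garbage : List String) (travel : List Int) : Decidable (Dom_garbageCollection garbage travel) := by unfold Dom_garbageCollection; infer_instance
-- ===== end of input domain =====

-- B scans forward recording the last house containing each garbage type and adds the
-- travel prefix needed to reach it, instead of A's backward per-type scan subtracting
-- trailing segments from 3*sum(travel) (objective: alternative decomposition).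


-- ===== PORT A =====
-- inner 'for g, t in zip(reversed(garbage), reversed(travel)): if c in g: break; ans -= t'
-- ('c in g' for a one-char c is exactly char membership, g.toList.contains c)
def pvInnerA (c : Char) (ans : Int) : List (String × Int) → Int
  | [] => ans
  | (g, t) :: rest => if g.toList.contains c then ans else pvInnerA c (ans - t) rest

def garbageCollection (garbage : List String) (travel : List Int) : Int :=
  let ans : Int := (garbage.map (fun g => PySem.Str.len g)).sum + travel.sum * 3
  ['M', 'P', 'G'].foldl (fun ans c => pvInnerA c ans (garbage.reverse.zip travel.reverse)) ans

-- ===== PORT B =====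
-- 'last = -1; for i, g in enumerate(garbage): if c in g: last = i'
def pvLastB (c : Char) (garbage : List String) : Int :=
  (PySem.List.enumerate garbage 0).foldl (fun last p => if p.2.toList.contains c then p.1 else last) (-1)

def garbageCollection_alt (garbage : List String) (travel : List Int) : Int :=
  let n : Int := PySem.List.len garbage
  let m : Int := PySem.List.len travel
  let total : Int := (garbage.map (fun g => PySem.Str.len g)).sum
  ['M', 'P', 'G'].foldl (fun total c =>
    let last := pvLastB c garbage
    let j : Int := if last ≥ 0 then n - 1 - last else n
    total + (PySem.List.slice travel none (some (max (m - j) 0))).sum) total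

-- ===== PRECONDITION & SPEC =====
def Spec_garbageCollection (garbage : List String) (travel : List Int) (out : Int) : Prop := out = garbageCollection_alt garbage travel
instance (garbage : List String) (travel : List Int) (out : Int) : Decidable (Spec_garbageCollection garbage travel out) := by unfold Spec_garbageCollection; infer_instance

-- ===== CLAIM (what is proved, stated in full; the proofs are below) =====
def Claim_equal_garbageCollection : Prop := ∀ (garbage : List String) (travel : List Int), Dom_garbageCollection garbage travel → Spec_garbageCollection garbage travel (garbageCollection garbage travel)

-- ===== LEMMAS AND PROOFS =====

-- A's inner loop subtracts the travel entries before the first (from the end) house containing c.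
lemma pvInnerA_eq_sub (c : Char) : ∀ (gs : List String) (ts : List Int) (ans : Int),
    pvInnerA c ans (gs.zip ts)
      = ans - (ts.take (gs.findIdx (fun g => g.toList.contains c))).sum := by
  intro gs
  induction gs with
  | nil => intro ts ans; simp [pvInnerA]
  | cons g gs ih =>
    intro ts ans
    cases ts with
    | nil => simp [pvInnerA]
    | cons t ts =>
      rw [List.zip_cons_cons, pvInnerA, List.findIdx_cons]
      by_cases h : g.toList.contains c
      · rw [if_pos h, h]; simp
      · have h' : g.toList.contains c = false := by simpa using h
        rw [if_neg h, ih, h']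
        simp only [cond_false, List.take_succ_cons, List.sum_cons]
        ring

-- sum of the first k entries of the reverse = total minus the first (length - k) entries.
lemma sum_take_reverse (ts : List Int) (k : Nat) :
    (ts.reverse.take k).sum = ts.sum - (ts.take (ts.length - k)).sum := by
  by_cases h : k ≤ ts.length
  · have hrev : ts.reverse.take k = (ts.drop (ts.length - k)).reverse := by
      rw [List.reverse_drop]
      congr 1
      omega
    rw [hrev, List.sum_reverse]
    have := List.sum_take_add_sum_drop ts (ts.length - k)
    omega
  · rw [List.take_of_length_le (by simp; omega), Nat.sub_eq_zero_of_le (by omega),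
        List.take_zero, List.sum_reverse]
    simp

-- B's last-occurrence scan, expressed through the first index of c in the reversed list.
lemma pvLastB_eq (c : Char) (gs : List String) :
    pvLastB c gs
      = (if gs.reverse.findIdx (fun g => g.toList.contains c) < gs.length
         then (gs.length : Int) - 1 - (gs.reverse.findIdx (fun g => g.toList.contains c) : Int)
         else -1) := by
  induction gs using List.reverseRecOn with
  | nil => simp [pvLastB]
  | append_singleton gs g ih =>
    unfold pvLastB
    unfold pvLastB at ih
    rw [PySem.List.enumerate_append, List.foldl_append, PySem.List.enumerate_cons,
      PySem.List.enumerate_nil, List.foldl_cons, List.foldl_nil, List.reverse_append,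
      List.reverse_singleton, List.singleton_append, ih]
    simp only [List.findIdx_cons, List.length_append, List.length_singleton]
    have hfi := List.findIdx_le_length (p := fun g => g.toList.contains c) (xs := gs.reverse)
    rw [List.length_reverse] at hfi
    by_cases h : g.toList.contains c
    · rw [if_pos h, h]
      simp only [cond_true]
      rw [if_pos (by omega)]
      push_cast
      ring
    · have h' : g.toList.contains c = false := by simpa using h
      rw [if_neg h, h']
      simp only [cond_false]
      split_ifs <;> push_cast <;> omega

-- the per-type term of A rewritten as the per-type term of B.
lemma per_type (c : Char) (garbage : List String) (travel : List Int) (ans : Int) :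
    pvInnerA c ans (garbage.reverse.zip travel.reverse)
      = ans - travel.sum
        + (PySem.List.slice travel none (some (max ((PySem.List.len travel)
            - (if pvLastB c garbage ≥ 0
               then (PySem.List.len garbage) - 1 - pvLastB c garbage
               else PySem.List.len garbage)) 0))).sum := by
  set P : String → Bool := fun g => g.toList.contains c with hP
  set k : Nat := garbage.reverse.findIdx P with hk
  have hfi : k ≤ garbage.length := by
    have := List.findIdx_le_length (p := P) (xs := garbage.reverse)
    rw [List.length_reverse] at this
    omega
  have hj : (if pvLastB c garbage ≥ 0
               then (PySem.List.len garbage) - 1 - pvLastB c garbage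
               else PySem.List.len garbage) = (k : Int) := by
    rw [pvLastB_eq, ← hP, ← hk]
    by_cases h : k < garbage.length
    · rw [if_pos h, if_pos (by omega), PySem.List.len_eq]
      ring
    · rw [if_neg h, if_neg (by omega), PySem.List.len_eq]
      omega
  rw [hj]
  have hmax : 0 ≤ max ((PySem.List.len travel) - (k : Int)) 0 := le_max_right _ _
  rw [PySem.List.slice_to (hb := hmax)]
  have htn : (max ((PySem.List.len travel) - (k : Int)) 0).toNat = travel.length - k := by
    rw [PySem.List.len_eq]; omega
  rw [htn, pvInnerA_eq_sub, ← hP, ← hk, sum_take_reverse]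
  ring

-- ===== VERDICT (by name: the statement is the Claim_ definition above) =====
theorem garbageCollection_spec : Claim_equal_garbageCollection := by
  intro garbage travel _
  unfold Spec_garbageCollection garbageCollection garbageCollection_alt
  simp only [List.foldl_cons, List.foldl_nil, per_type]
  ring
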